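-- pv_equiv track=rewrite | github.com/MrBrantCode/unitest_baseline | mut_generate/mist_train_cf/cf_94982/solution.py | prime_count_and_product
-- ===== SOURCE A (Python) =====
-- def is_prime(n):
--     if n <= 1:
--         return False
--     for i in range(2, int(n**0.5) + 1):
--         if n % i == 0:
--             return False
--     return True
--
-- def prime_count_and_product(numbers):
--     prime_count = 0
--     prime_product = 1
--
--     for num in numbers:
--         if is_prime(num):
--             prime_count += 1
--             prime_product *= num
--
--     return prime_count, prime_product
-- ===== SOURCE B (Python) =====
-- import math
--
-- def prime_count_and_product(numbers):
--     # Sieve of Eratosthenes up to isqrt(max value), then test each number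
--     # by trial division against that shared prime table only.
--     cap = max((n for n in numbers if n >= 2), default=0)
--     limit = math.isqrt(cap)
--     is_comp = bytearray(limit + 1)
--     small_primes = []
--     for p in range(2, limit + 1):
--         if not is_comp[p]:
--             small_primes.append(p)
--             for q in range(p * p, limit + 1, p):
--                 is_comp[q] = 1
--     primes = [n for n in numbers
--               if n >= 2 and all(n % p for p in small_primes if p * p <= n)]
--     return len(primes), math.prod(primes)
-- ===== Notes on version B (the rewrite author's own statement) =====
-- stated objective: faster
-- what changed: Replaces per-number trial division by every integer up to sqrt(n) with a sieve of Eratosthenes built once up to isqrt(max(numbers)), after which each number is tested against that shared prime table only (divisors restricted to primes), and the interleaved count/product accumulator is replaced by a filter followed by len and math.prod.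
import Mathlib
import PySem

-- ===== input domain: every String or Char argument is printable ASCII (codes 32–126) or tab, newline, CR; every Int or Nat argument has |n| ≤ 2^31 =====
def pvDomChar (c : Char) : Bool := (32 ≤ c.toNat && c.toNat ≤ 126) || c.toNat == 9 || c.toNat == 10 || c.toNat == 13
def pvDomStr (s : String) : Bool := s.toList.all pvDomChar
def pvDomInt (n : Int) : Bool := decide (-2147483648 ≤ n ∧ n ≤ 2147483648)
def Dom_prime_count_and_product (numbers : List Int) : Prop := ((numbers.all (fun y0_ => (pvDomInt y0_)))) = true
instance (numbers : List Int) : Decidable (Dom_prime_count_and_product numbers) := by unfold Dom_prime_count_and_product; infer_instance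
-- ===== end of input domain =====

-- B builds a sieve of Eratosthenes once up to isqrt(max(numbers)) and tests each number by
-- trial division against that shared prime table only, then aggregates by filter + len/prod
-- (objective: faster — far fewer trial divisors per element).

-- ===== PORT A =====
-- integer square root by binary search (fast to evaluate); proved equal to Nat.sqrt below,
-- used to port Python's int(n**0.5) / math.isqrt (exact on the admitted domain)
def pvIsqrtGo (n : Nat) (lo hi : Nat) : Nat :=
  if h : lo < hi then
    if ((lo + hi + 1) / 2) * ((lo + hi + 1) / 2) ≤ n then pvIsqrtGo n ((lo + hi + 1) / 2) hi
    else pvIsqrtGo n lo ((lo + hi + 1) / 2 - 1)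
  else lo
termination_by hi - lo
decreasing_by all_goals omega

def pvIsqrt (n : Nat) : Nat := pvIsqrtGo n 0 n

-- A's inner `for i in range(2, int(n**0.5) + 1)` with early `return False`:
def pvAIsPrimeLoop (n : Int) : List Int → Bool
  | [] => true
  | i :: rest => if PySem.Int.mod n i == 0 then false else pvAIsPrimeLoop n rest

-- `int(n**0.5)`: for the reached values 2 ≤ n ≤ 2^31 (Dom) the double-precision sqrt is
-- correctly rounded and int(n**0.5) equals the integer square root; ported as Nat.sqrt (exact there).
def pvAIsPrime (n : Int) : Bool :=
  if n ≤ 1 then false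
  else pvAIsPrimeLoop n (PySem.List.pyRange 2 (((pvIsqrt n.toNat : Nat) : Int) + 1) 1)

def prime_count_and_product (numbers : List Int) : Int × Int :=
  numbers.foldl
    (fun (st : Int × Int) num => if pvAIsPrime num then (st.1 + 1, st.2 * num) else st)
    (0, 1)

-- ===== PORT B =====
-- `max((n for n in numbers if n >= 2), default=0)`
def pvBCap (numbers : List Int) : Int :=
  (numbers.filter (fun n => decide (2 ≤ n))).foldl max 0

-- the bytearray `is_comp` is ported as a bit-set Nat (bit q = is_comp[q]; bytearray(limit+1)
-- of zeros = 0, `is_comp[q] = 1` = or-ing in 2^q, `is_comp[p]` = testBit p — the same flags,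
-- exact since the sieve only touches indices 2..limit); one step of the outer sieve loop:
def pvSieveStep (limit : Int) : Nat × List Int → Int → Nat × List Int
  | (comp, lst), p =>
    if comp.testBit p.toNat then (comp, lst)
    else ((PySem.List.pyRange (p * p) (limit + 1) p).foldl
            (fun c q => c ||| 2 ^ q.toNat) comp,
          lst ++ [p])

def pvSieve (limit : Int) : Nat × List Int :=
  (PySem.List.pyRange 2 (limit + 1) 1).foldl (pvSieveStep limit) (0, [])

-- `n >= 2 and all(n % p for p in small_primes if p * p <= n)`
def pvBIsPrime (small : List Int) (n : Int) : Bool :=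
  decide (2 ≤ n) &&
    (small.filter (fun p => decide (p * p ≤ n))).all (fun p => !(PySem.Int.mod n p == 0))

-- `math.isqrt` ported as Nat.sqrt (exact for nonnegative arguments).
def prime_count_and_product_alt (numbers : List Int) : Int × Int :=
  let cap := pvBCap numbers
  let limit : Int := ((pvIsqrt cap.toNat : Nat) : Int)
  let small := (pvSieve limit).2
  let primes := numbers.filter (pvBIsPrime small)
  ((primes.length : Int), primes.prod)

-- ===== PRECONDITION & SPEC =====
def Spec_prime_count_and_product (numbers : List Int) (out : Int × Int) : Prop := out = prime_count_and_product_alt numbers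
instance (numbers : List Int) (out : Int × Int) : Decidable (Spec_prime_count_and_product numbers out) := by unfold Spec_prime_count_and_product; infer_instance

-- ===== CLAIM (what is proved, stated in full; the proofs are below) =====
def Claim_equal_prime_count_and_product : Prop := ∀ (numbers : List Int), Dom_prime_count_and_product numbers → Spec_prime_count_and_product numbers (prime_count_and_product numbers)

-- ===== LEMMAS AND PROOFS =====

theorem pvIsqrtGo_spec (n : Nat) : ∀ (k lo hi : Nat), hi - lo = k → lo * lo ≤ n →
    n < (hi + 1) * (hi + 1) → lo ≤ hi →
    pvIsqrtGo n lo hi * pvIsqrtGo n lo hi ≤ n ∧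
      n < (pvIsqrtGo n lo hi + 1) * (pvIsqrtGo n lo hi + 1) := by
  intro k
  induction k using Nat.strong_induction_on with
  | _ k ih =>
    intro lo hi hk h1 h2 hle
    rw [pvIsqrtGo]
    by_cases h : lo < hi
    · rw [dif_pos h]
      by_cases hm : ((lo + hi + 1) / 2) * ((lo + hi + 1) / 2) ≤ n
      · rw [if_pos hm]
        exact ih (hi - (lo + hi + 1) / 2) (by omega) _ _ rfl hm h2 (by omega)
      · rw [if_neg hm]
        refine ih ((lo + hi + 1) / 2 - 1 - lo) (by omega) _ _ rfl h1 ?_ (by omega)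
        have heq : (lo + hi + 1) / 2 - 1 + 1 = (lo + hi + 1) / 2 := by omega
        rw [heq]; omega
    · rw [dif_neg h]
      have hlohi : lo = hi := by omega
      subst hlohi
      exact ⟨h1, h2⟩

theorem pvIsqrt_eq_sqrt (n : Nat) : pvIsqrt n = Nat.sqrt n := by
  obtain ⟨h1, h2⟩ := pvIsqrtGo_spec n (n - 0) 0 n rfl (by simp) (by nlinarith) (Nat.zero_le n)
  rw [show pvIsqrtGo n 0 n = pvIsqrt n from rfl] at h1 h2
  have ha : pvIsqrt n ≤ Nat.sqrt n := Nat.le_sqrt.mpr h1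
  have hb : Nat.sqrt n ≤ pvIsqrt n := by
    by_contra hcon
    have hc2 : pvIsqrt n + 1 ≤ Nat.sqrt n := by omega
    have := Nat.le_sqrt.mp hc2
    omega
  omega

-- "no small prime factor": the common characterisation both primality tests reduce to
def pvNSF (n : Int) : Prop :=
  ∀ p : Int, 2 ≤ p → Nat.Prime p.toNat → p * p ≤ n → ¬ p ∣ n

theorem pv_sq_le_iff_le_sqrt (p n : Int) (hp : 0 ≤ p) (hn : 0 ≤ n) :
    p * p ≤ n ↔ p ≤ (n.toNat.sqrt : Int) := by
  have h1 : p = (p.toNat : Int) := by omega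
  have h2 : n = (n.toNat : Int) := by omega
  rw [h1]
  constructor
  · intro h
    have : p.toNat * p.toNat ≤ n.toNat := by omega
    exact_mod_cast Nat.le_sqrt.mpr this
  · intro h
    have : p.toNat ≤ n.toNat.sqrt := by exact_mod_cast h
    have := Nat.le_sqrt.mp this
    omega

-- every composite n ≥ 2 has a prime factor r with r*r ≤ n and r < n
theorem pv_minFac_step (n : Int) (hn : 2 ≤ n) (hnp : ¬ Nat.Prime n.toNat) :
    ∃ r : Int, 2 ≤ r ∧ Nat.Prime r.toNat ∧ r ∣ n ∧ r * r ≤ n ∧ r < n := by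
  have hm : 2 ≤ n.toNat := by omega
  have hne1 : n.toNat ≠ 1 := by omega
  have hpr := Nat.minFac_prime hne1
  have hdvd := Nat.minFac_dvd n.toNat
  have hsq := Nat.minFac_sq_le_self (show 0 < n.toNat by omega) hnp
  refine ⟨(n.toNat.minFac : Int), by exact_mod_cast hpr.two_le, by simpa using hpr, ?_, ?_, ?_⟩
  · have : (n.toNat.minFac : Int) ∣ (n.toNat : Int) := Int.natCast_dvd_natCast.mpr hdvd
    simpa [Int.toNat_of_nonneg (by omega : (0:Int) ≤ n)] using this
  · have : n.toNat.minFac * n.toNat.minFac ≤ n.toNat := by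
      have := hsq; rw [pow_two] at this; exact this
    omega
  · have h2 : 2 ≤ n.toNat.minFac := hpr.two_le
    have hmm : n.toNat.minFac * n.toNat.minFac ≤ n.toNat := by
      have := hsq; rw [pow_two] at this; exact this
    have h2f : 2 * n.toNat.minFac ≤ n.toNat.minFac * n.toNat.minFac := by nlinarith
    omega

-- a prime has no prime factor strictly below it
theorem pv_no_proper (p r : Int) (hp2 : 2 ≤ p) (hpp : Nat.Prime p.toNat)
    (hr2 : 2 ≤ r) (_hrp : Nat.Prime r.toNat) (hdvd : r ∣ p) (hlt : r < p) : False := by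
  have hd : r.toNat ∣ p.toNat := by
    have h1 : r = (r.toNat : Int) := by omega
    have h2 : p = (p.toNat : Int) := by omega
    rw [h1, h2] at hdvd
    exact_mod_cast hdvd
  rcases (Nat.Prime.eq_one_or_self_of_dvd hpp _ hd) with h | h
  · omega
  · omega

-- mod by a positive divisor is zero exactly on divisibility (as the Bool A and B test)
theorem pv_mod_bool (n p : Int) : (!(PySem.Int.mod n p == 0)) = true ↔ ¬ p ∣ n := by
  simp [PySem.Int.mod_eq_zero_iff_dvd]

-- ---- A's primality test ↔ pvNSF ----

theorem pvAIsPrimeLoop_eq_all (n : Int) (l : List Int) :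
    pvAIsPrimeLoop n l = l.all (fun i => !(PySem.Int.mod n i == 0)) := by
  induction l with
  | nil => rfl
  | cons i rest ih =>
    simp only [pvAIsPrimeLoop, List.all_cons, ih]
    by_cases h : PySem.Int.mod n i == 0 <;> simp [h]

theorem pvA_iff (n : Int) (hn : 2 ≤ n) : pvAIsPrime n = true ↔ pvNSF n := by
  unfold pvAIsPrime
  rw [pvIsqrt_eq_sqrt]
  rw [if_neg (by omega), pvAIsPrimeLoop_eq_all, List.all_eq_true]
  constructor
  · intro h p hp2 hpp hsq hdvd
    have hmem : p ∈ PySem.List.pyRange 2 ((n.toNat.sqrt : Int) + 1) 1 :=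
      PySem.List.mem_pyRange_one.mpr
        ⟨hp2, by have := (pv_sq_le_iff_le_sqrt p n (by omega) (by omega)).mp hsq; omega⟩
    exact (pv_mod_bool n p).mp (h p hmem) hdvd
  · intro h i hi
    have hi' := PySem.List.mem_pyRange_one.mp hi
    have hle : i ≤ (n.toNat.sqrt : Int) := by omega
    have hii : i * i ≤ n := (pv_sq_le_iff_le_sqrt i n (by omega) (by omega)).mpr hle
    rw [pv_mod_bool]
    intro hdvd
    by_cases hip : Nat.Prime i.toNat
    · exact h i hi'.1 hip hii hdvd
    · obtain ⟨r, hr2, hrp, hrdvd, hrsq, _⟩ := pv_minFac_step i hi'.1 hip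
      have : r * r ≤ n := le_trans hrsq (by nlinarith [hi'.1])
      exact h r hr2 hrp this (dvd_trans hrdvd hdvd)

-- ---- sieve correctness ----

theorem pv_mark_get (qs : List Int) (c : Nat) (i : Nat) :
    (qs.foldl (fun c q => c ||| 2 ^ q.toNat) c).testBit i
      = (decide (∃ q ∈ qs, q.toNat = i) || c.testBit i) := by
  induction qs generalizing c with
  | nil => simp
  | cons q rest ih =>
    rw [List.foldl_cons, ih]
    rw [Nat.testBit_or, Nat.testBit_two_pow]
    by_cases h : q.toNat = i
    · subst h
      simp
    · have hiff : (∃ r ∈ q :: rest, r.toNat = i) ↔ (∃ r ∈ rest, r.toNat = i) := by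
        constructor
        · rintro ⟨r, hr, hri⟩
          rcases List.mem_cons.mp hr with rfl | hr'
          · exact absurd hri h
          · exact ⟨r, hr', hri⟩
        · rintro ⟨r, hr, hri⟩; exact ⟨r, List.mem_cons_of_mem _ hr, hri⟩
      rw [show (decide (∃ r ∈ q :: rest, r.toNat = i)) = (decide (∃ r ∈ rest, r.toNat = i)) from decide_eq_decide.mpr hiff]
      simp [h]

def pvSInv (limit m : Int) (st : Nat × List Int) : Prop :=
  (∀ x : Int, st.1.testBit x.toNat = true ↔
      ∃ r : Int, 2 ≤ r ∧ r ≤ m ∧ Nat.Prime r.toNat ∧ r * r ≤ x ∧ x ≤ limit ∧ r ∣ x) ∧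
  (∀ q : Int, q ∈ st.2 ↔ 2 ≤ q ∧ q ≤ m ∧ Nat.Prime q.toNat)

theorem pv_step_inv (limit m : Int) (st : Nat × List Int)
    (h : pvSInv limit m st) (hm : 1 ≤ m) (hpl : m + 1 ≤ limit) :
    pvSInv limit (m + 1) (pvSieveStep limit st (m + 1)) := by
  obtain ⟨comp, lst⟩ := st
  obtain ⟨hc, hl⟩ := h
  simp only at hc hl
  set p := m + 1 with hp
  have hp2 : 2 ≤ p := by omega
  show pvSInv limit p (pvSieveStep limit (comp, lst) p)
  simp only [pvSieveStep]
  by_cases hmark : comp.testBit p.toNat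
  · -- p already marked: p is composite
    obtain ⟨r, hr2, hrm, hrp, hrsq, _, hrd⟩ := (hc p).mp hmark
    have hrlt : r < p := by nlinarith
    have hpnotp : ¬ Nat.Prime p.toNat := fun hpp => pv_no_proper p r hp2 hpp hr2 hrp hrd hrlt
    rw [if_pos hmark]
    refine ⟨?_, ?_⟩
    · intro x
      rw [hc x]
      constructor
      · rintro ⟨s, h1, h2, h3⟩; exact ⟨s, h1, by omega, h3⟩
      · rintro ⟨s, h1, h2, h3, h4, h5, h6⟩
        refine ⟨s, h1, ?_, h3, h4, h5, h6⟩
        rcases lt_or_eq_of_le h2 with h | h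
        · omega
        · exact absurd (h ▸ h3) hpnotp
    · intro q
      rw [hl q]
      constructor
      · rintro ⟨h1, h2, h3⟩; exact ⟨h1, by omega, h3⟩
      · rintro ⟨h1, h2, h3⟩
        refine ⟨h1, ?_, h3⟩
        rcases lt_or_eq_of_le h2 with h | h
        · omega
        · exact absurd (h ▸ h3) hpnotp
  · -- p unmarked: p is prime; mark its multiples from p*p
    have hpp : Nat.Prime p.toNat := by
      by_contra hnp
      obtain ⟨r, hr2, hrp, hrd, hrsq, hrlt⟩ := pv_minFac_step p hp2 hnp
      exact hmark ((hc p).mpr ⟨r, hr2, by omega, hrp, hrsq, by omega, hrd⟩)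
    rw [if_neg hmark]
    have hmemq : ∀ q ∈ PySem.List.pyRange (p * p) (limit + 1) p,
        p * p ≤ q ∧ q < limit + 1 ∧ p ∣ (q - p * p) :=
      fun q hq => PySem.List.mem_pyRange_iff_of_pos (by omega) q |>.mp hq
    refine ⟨?_, ?_⟩
    · intro x
      rw [pv_mark_get]
      constructor
      · intro hx
        rcases Bool.or_eq_true_iff.mp hx with hx | hx
        · obtain ⟨q, hq, hqx⟩ := of_decide_eq_true hx
          obtain ⟨h1, h2, h3⟩ := hmemq q hq
          have hq4 : 4 ≤ q := by nlinarith
          have hxq : x = q := by omega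
          subst hxq
          have : p ∣ x := by simpa using dvd_add h3 (dvd_mul_left p p)
          exact ⟨p, hp2, le_refl _, hpp, h1, by omega, this⟩
        · obtain ⟨s, h1, h2, h3⟩ := (hc x).mp hx
          exact ⟨s, h1, by omega, h3⟩
      · rintro ⟨s, h1, h2, h3, h4, h5, h6⟩
        rcases lt_or_eq_of_le h2 with h | h
        · exact Bool.or_eq_true_iff.mpr (Or.inr ((hc x).mpr ⟨s, h1, by omega, h3, h4, h5, h6⟩))
        · refine Bool.or_eq_true_iff.mpr (Or.inl (decide_eq_true ⟨x, ?_, rfl⟩))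
          refine (PySem.List.mem_pyRange_iff_of_pos (by omega) x).mpr
            ⟨by nlinarith [h ▸ h4], by omega, dvd_sub (h ▸ h6) (dvd_mul_left p p)⟩
    · intro q
      rw [List.mem_append, hl q, List.mem_singleton]
      constructor
      · rintro (⟨h1, h2, h3⟩ | h)
        · exact ⟨h1, by omega, h3⟩
        · exact ⟨by omega, by omega, h ▸ hpp⟩
      · rintro ⟨h1, h2, h3⟩
        rcases lt_or_eq_of_le h2 with h | h
        · exact Or.inl ⟨h1, by omega, h3⟩
        · exact Or.inr h

theorem pv_sieve_inv (limit : Int) (b : Int) (hb : 1 ≤ b) (hbl : b ≤ limit) :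
    pvSInv limit b
      ((PySem.List.pyRange 2 (b + 1) 1).foldl (pvSieveStep limit) (0, [])) := by
  revert hbl
  induction b, hb using Int.le_induction with
  | base =>
    intro _
    rw [PySem.List.pyRange_one_eq_nil (by omega)]
    refine ⟨fun x => ?_, fun q => by simp; omega⟩
    constructor
    · intro hx; rw [List.foldl_nil, Nat.zero_testBit] at hx; cases hx
    · rintro ⟨r, h1, h2, _⟩; omega
  | succ b hb1 ih =>
    intro hbl
    rw [PySem.List.pyRange_one_succ_right (by omega), List.foldl_append]
    exact pv_step_inv limit b _ (ih (by omega)) hb1 hbl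

theorem pv_sieve_mem (limit q : Int) :
    q ∈ (pvSieve limit).2 ↔ 2 ≤ q ∧ q ≤ limit ∧ Nat.Prime q.toNat := by
  unfold pvSieve
  by_cases hl : limit ≤ 1
  · rw [PySem.List.pyRange_one_eq_nil (by omega)]
    simp; omega
  · exact (pv_sieve_inv limit limit (by omega) (le_refl _)).2 q

-- ---- B's primality test ↔ pvNSF (for n bounded by cap) ----

theorem pvB_iff (cap n : Int) (hn : 2 ≤ n) (hcap : n ≤ cap) :
    pvBIsPrime (pvSieve ((cap.toNat.sqrt : Int))).2 n = true ↔ pvNSF n := by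
  unfold pvBIsPrime
  rw [Bool.and_eq_true, List.all_eq_true]
  constructor
  · rintro ⟨-, h⟩ p hp2 hpp hsq hdvd
    have hpl : p ≤ (cap.toNat.sqrt : Int) :=
      (pv_sq_le_iff_le_sqrt p cap (by omega) (by omega)).mp (by omega)
    have hmem : p ∈ ((pvSieve ((cap.toNat.sqrt : Int))).2).filter (fun p => decide (p * p ≤ n)) :=
      List.mem_filter.mpr ⟨(pv_sieve_mem _ p).mpr ⟨hp2, hpl, hpp⟩, decide_eq_true hsq⟩
    exact (pv_mod_bool n p).mp (h p hmem) hdvd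
  · intro h
    refine ⟨decide_eq_true hn, fun p hp => ?_⟩
    obtain ⟨hmem, hsq⟩ := List.mem_filter.mp hp
    obtain ⟨hp2, _, hpp⟩ := (pv_sieve_mem _ p).mp hmem
    exact (pv_mod_bool n p).mpr (h p hp2 hpp (of_decide_eq_true hsq))

-- ---- cap bounds every relevant element ----

theorem pv_le_foldl_max (l : List Int) (a : Int) : a ≤ l.foldl max a := by
  induction l generalizing a with
  | nil => simp
  | cons y t ih => exact le_trans (le_max_left a y) (ih (max a y))

theorem pv_mem_le_foldl_max (l : List Int) (a x : Int) (hx : x ∈ l) : x ≤ l.foldl max a := by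
  induction l generalizing a with
  | nil => cases hx
  | cons y t ih =>
    rcases List.mem_cons.mp hx with h | h
    · subst h; exact le_trans (le_max_right a x) (pv_le_foldl_max t _)
    · exact ih _ h

theorem pv_cap_bound (numbers : List Int) (n : Int) (hn : n ∈ numbers) (h2 : 2 ≤ n) :
    n ≤ pvBCap numbers := by
  unfold pvBCap
  exact pv_mem_le_foldl_max _ 0 n (List.mem_filter.mpr ⟨hn, decide_eq_true h2⟩)

-- ---- predicates agree on the list's members ----

theorem pv_pred_agree (numbers : List Int) (n : Int) (hn : n ∈ numbers) :
    pvAIsPrime n = pvBIsPrime (pvSieve (((pvBCap numbers).toNat.sqrt : Int))).2 n := by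
  by_cases h2 : 2 ≤ n
  · have hcap := pv_cap_bound numbers n hn h2
    rw [Bool.eq_iff_iff, pvA_iff n h2, pvB_iff (pvBCap numbers) n h2 hcap]
  · unfold pvAIsPrime pvBIsPrime
    rw [if_pos (by omega)]
    simp [show ¬ (2 ≤ n) from h2]

-- ---- A's interleaved fold = count/product of the filtered list ----

theorem pv_fold_eq (l : List Int) (c p : Int) :
    l.foldl (fun (st : Int × Int) num => if pvAIsPrime num then (st.1 + 1, st.2 * num) else st) (c, p)
      = (c + ((l.filter pvAIsPrime).length : Int), p * (l.filter pvAIsPrime).prod) := by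
  induction l generalizing c p with
  | nil => simp
  | cons x xs ih =>
    simp only [List.foldl_cons, List.filter_cons]
    by_cases hx : pvAIsPrime x
    · simp only [hx, if_true, ih, List.length_cons, List.prod_cons, Prod.mk.injEq]
      constructor
      · push_cast; ring
      · ring
    · simp [hx, ih]

-- ===== VERDICT (by name: the statement is the Claim_ definition above) =====
theorem prime_count_and_product_spec : Claim_equal_prime_count_and_product := by
  intro numbers _
  unfold Spec_prime_count_and_product prime_count_and_product prime_count_and_product_alt
  simp only [pvIsqrt_eq_sqrt]
  rw [pv_fold_eq,
      List.filter_congr (fun x hx => pv_pred_agree numbers x hx)]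
  simp
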